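-- pv_equiv track=rewrite | github.com/zxjsdp/TreeASCIIView | asciitree/asciitree.py | extract_pure_newick_tree_string
-- ===== SOURCE A (Python) =====
-- def extract_pure_newick_tree_string(raw_tree_content):
--     """Read tree content, parse, and return tree string"""
--     tmp_tree_str = ''
--     tree_start_flag = False
--     lines = raw_tree_content.split('\n')
--     for line in lines:
--         line = line.strip()
--         if line.startswith('('):
--             tree_start_flag = True
--         if not tree_start_flag:
--             continue
--         if line.startswith('//') or line.startswith('#'):
--             break
--         else:
--             tmp_tree_str += line
--     return tmp_tree_str
-- ===== SOURCE B (Python) =====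
-- def extract_pure_newick_tree_string(raw_tree_content):
--     """Read tree content, parse, and return tree string"""
--     lines = [line.strip() for line in raw_tree_content.split('\n')]
--     # phase 1: drop lines until the first one starting with '('
--     while lines and not lines[0].startswith('('):
--         lines.pop(0)
--     # phase 2: collect until a comment line
--     parts = []
--     for line in lines:
--         if line.startswith('//') or line.startswith('#'):
--             break
--         parts.append(line)
--     return ''.join(parts)
-- ===== Notes on version B (the rewrite author's own statement) =====
-- stated objective: simpler
-- what changed: Replaces the boolean tree_start_flag with a two-phase decomposition: first drop stripped lines until one starts with '(', then collect lines until a comment line and join them.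
import Mathlib
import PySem

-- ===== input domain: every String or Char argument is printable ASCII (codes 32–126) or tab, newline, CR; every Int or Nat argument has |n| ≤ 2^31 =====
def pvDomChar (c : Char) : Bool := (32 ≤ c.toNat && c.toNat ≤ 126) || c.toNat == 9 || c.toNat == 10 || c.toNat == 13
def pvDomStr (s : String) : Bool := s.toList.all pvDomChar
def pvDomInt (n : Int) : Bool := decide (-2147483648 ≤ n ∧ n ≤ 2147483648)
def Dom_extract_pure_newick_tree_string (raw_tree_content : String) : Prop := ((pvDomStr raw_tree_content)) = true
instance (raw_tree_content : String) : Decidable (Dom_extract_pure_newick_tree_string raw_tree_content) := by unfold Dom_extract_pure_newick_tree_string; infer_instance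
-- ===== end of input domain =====

-- B replaces A's boolean flag with a two-phase decomposition (drop until '(' line, then
-- collect until a comment line and join); same result, objective: simpler.

-- ===== PORT A =====
-- A's for-loop with accumulator, flag and break, as structural recursion over the lines.
def pvGoA : List String → String → Bool → String
  | [], tmp, _ => tmp
  | l :: ls, tmp, flag =>
    let line := PySem.Str.strip l
    let flag := flag || PySem.Str.startswith line "("
    if !flag then pvGoA ls tmp flag
    else if PySem.Str.startswith line "//" || PySem.Str.startswith line "#" then tmp
    else pvGoA ls (tmp ++ line) flag

def extract_pure_newick_tree_string (raw_tree_content : String) : String :=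
  pvGoA ((PySem.Str.split? raw_tree_content "\n").getD []) "" false

-- ===== PORT B =====
-- phase 1: drop stripped lines until the first one starting with '('
def pvDropB : List String → List String
  | [] => []
  | l :: ls => if PySem.Str.startswith l "(" then l :: ls else pvDropB ls

-- phase 2: collect lines until a comment line
def pvCollectB : List String → List String
  | [] => []
  | l :: ls =>
    if PySem.Str.startswith l "//" || PySem.Str.startswith l "#" then []
    else l :: pvCollectB ls

def extract_pure_newick_tree_string_alt (raw_tree_content : String) : String :=
  PySem.Str.join ""
    (pvCollectB (pvDropB (((PySem.Str.split? raw_tree_content "\n").getD []).map PySem.Str.strip)))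

-- ===== PRECONDITION & SPEC =====
def Spec_extract_pure_newick_tree_string (raw_tree_content : String) (out : String) : Prop := out = extract_pure_newick_tree_string_alt raw_tree_content
instance (raw_tree_content : String) (out : String) : Decidable (Spec_extract_pure_newick_tree_string raw_tree_content out) := by unfold Spec_extract_pure_newick_tree_string; infer_instance

-- ===== CLAIM (what is proved, stated in full; the proofs are below) =====
def Claim_equal_extract_pure_newick_tree_string : Prop := ∀ (raw_tree_content : String), Dom_extract_pure_newick_tree_string raw_tree_content → Spec_extract_pure_newick_tree_string raw_tree_content (extract_pure_newick_tree_string raw_tree_content)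

-- ===== LEMMAS AND PROOFS =====
lemma pvJoin_empty_nil : PySem.Str.join "" [] = "" := by
  simp [PySem.Str.join, PySem.Chars.join, List.intercalate]

lemma pvJoin_empty_cons (l : String) (ls : List String) :
    PySem.Str.join "" (l :: ls) = l ++ PySem.Str.join "" ls := by
  apply String.toList_inj.mp
  cases ls with
  | nil => simp [PySem.Str.join, PySem.Chars.join, List.intercalate]
  | cons b t => simp [PySem.Str.join, PySem.Chars.join, List.intercalate]

-- A's loop after the flag is set concatenates stripped lines until a comment line.
lemma pvGoA_true (ls : List String) (tmp : String) :
    pvGoA ls tmp true = tmp ++ PySem.Str.join "" (pvCollectB (ls.map PySem.Str.strip)) := by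
  induction ls generalizing tmp with
  | nil => simp [pvGoA, pvCollectB, pvJoin_empty_nil]
  | cons l ls ih =>
    simp only [pvGoA, List.map, pvCollectB, Bool.true_or, Bool.not_true, Bool.false_eq_true,
      if_false]
    split
    · simp [pvJoin_empty_nil]
    · rw [ih, pvJoin_empty_cons, String.append_assoc]

-- A's loop with the flag down matches drop-then-collect.
lemma pvGoA_false (ls : List String) (tmp : String) :
    pvGoA ls tmp false = tmp ++ PySem.Str.join "" (pvCollectB (pvDropB (ls.map PySem.Str.strip))) := by
  induction ls generalizing tmp with
  | nil => simp [pvGoA, pvDropB, pvCollectB, pvJoin_empty_nil]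
  | cons l ls ih =>
    simp only [pvGoA, List.map, pvDropB, Bool.false_or]
    by_cases h : PySem.Str.startswith (PySem.Str.strip l) "(" = true
    · simp only [h, if_true, Bool.not_true, Bool.false_eq_true, if_false, pvCollectB]
      split
      · simp [pvJoin_empty_nil]
      · rw [pvGoA_true, pvJoin_empty_cons, String.append_assoc]
    · simp only [Bool.not_eq_true] at h
      simp only [h, Bool.not_false, if_true, Bool.false_eq_true, if_false]
      exact ih tmp

-- ===== VERDICT (by name: the statement is the Claim_ definition above) =====
theorem extract_pure_newick_tree_string_spec : Claim_equal_extract_pure_newick_tree_string := by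
  intro s _
  show _ = _
  rw [extract_pure_newick_tree_string, extract_pure_newick_tree_string_alt, pvGoA_false]
  simp
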